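-- pv_equiv track=rewrite | github.com/Tsahi-Elkayam/clouptimizer | src/analysis/advanced_optimization.py | _identify_cluster_type
-- ===== SOURCE A (Python) =====
-- from typing import List, Dict, Any, Optional, Tuple, Set
--
-- def _identify_cluster_type(resources: List[Dict]) -> str:
--     """Identify the type of resource cluster"""
--     # Check common tags or patterns
--     environments = set(r.get('environment', '') for r in resources)
--     if len(environments) == 1:
--         return "environment"
--
--     applications = set(r.get('application', '') for r in resources)
--     if len(applications) == 1:
--         return "application"
--
--     services = set(r.get('service', '') for r in resources)
--     if len(services) == 1:
--         return "service"
--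
--     return "mixed"
-- ===== SOURCE B (Python) =====
-- def _identify_cluster_type(resources):
--     """Identify the type of resource cluster (single pass, first-seen + uniform flags)."""
--     names = ("environment", "application", "service")
--     firsts = [None, None, None]
--     uniform = [False, False, False]
--     seen = False
--     for r in resources:
--         vals = [r.get(a, '') for a in names]
--         if not seen:
--             firsts = vals
--             uniform = [True, True, True]
--             seen = True
--         else:
--             for i in range(3):
--                 if uniform[i] and vals[i] != firsts[i]:
--                     uniform[i] = False
--     for i, a in enumerate(names):
--         if uniform[i]:
--             return a
--     return "mixed"
-- ===== Notes on version B (the rewrite author's own statement) =====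
-- stated objective: alternative
-- what changed: Replaced the three separate set-building passes with a single pass that tracks a first-seen value and a uniform flag per attribute and builds no sets.
import Mathlib
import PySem

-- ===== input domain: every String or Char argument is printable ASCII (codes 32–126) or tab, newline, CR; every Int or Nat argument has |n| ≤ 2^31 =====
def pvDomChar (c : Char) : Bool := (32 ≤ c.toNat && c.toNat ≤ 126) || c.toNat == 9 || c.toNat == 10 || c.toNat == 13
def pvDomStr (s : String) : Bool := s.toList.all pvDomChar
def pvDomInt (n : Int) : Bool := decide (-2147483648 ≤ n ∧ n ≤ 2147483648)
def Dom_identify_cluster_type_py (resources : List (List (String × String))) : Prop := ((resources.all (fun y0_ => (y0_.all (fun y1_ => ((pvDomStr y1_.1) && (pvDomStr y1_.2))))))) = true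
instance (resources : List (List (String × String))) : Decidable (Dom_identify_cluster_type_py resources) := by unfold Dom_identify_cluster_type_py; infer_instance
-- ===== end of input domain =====

-- B replaces A's three set-building passes by one pass keeping a first-seen value and a uniform flag per attribute (no sets built).

-- ===== PORT A =====
def identify_cluster_type_py (resources : List (List (String × String))) : String :=
  let environments := PySem.Set.ofList (resources.map (fun r => PySem.Dict.getD (PySem.Dict.mk r) "environment" ""))
  if environments.length == 1 then "environment"
  else
    let applications := PySem.Set.ofList (resources.map (fun r => PySem.Dict.getD (PySem.Dict.mk r) "application" ""))
    if applications.length == 1 then "application"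
    else
      let services := PySem.Set.ofList (resources.map (fun r => PySem.Dict.getD (PySem.Dict.mk r) "service" ""))
      if services.length == 1 then "service"
      else "mixed"

-- ===== PORT B =====
-- state: none = no resource seen yet; some (firsts, uniform flags) afterwards
def pvAltStep (st : Option ((String × String × String) × (Bool × Bool × Bool)))
    (r : List (String × String)) : Option ((String × String × String) × (Bool × Bool × Bool)) :=
  let v1 := PySem.Dict.getD (PySem.Dict.mk r) "environment" ""
  let v2 := PySem.Dict.getD (PySem.Dict.mk r) "application" ""
  let v3 := PySem.Dict.getD (PySem.Dict.mk r) "service" ""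
  match st with
  | none => some ((v1, v2, v3), (true, true, true))
  | some ((f1, f2, f3), (u1, u2, u3)) =>
      some ((f1, f2, f3), (u1 && (v1 == f1), u2 && (v2 == f2), u3 && (v3 == f3)))

def identify_cluster_type_py_alt (resources : List (List (String × String))) : String :=
  match resources.foldl pvAltStep none with
  | none => "mixed"
  | some (_, (u1, u2, u3)) =>
      if u1 then "environment"
      else if u2 then "application"
      else if u3 then "service"
      else "mixed"

-- ===== PRECONDITION & SPEC =====
def Spec_identify_cluster_type_py (resources : List (List (String × String))) (out : String) : Prop := out = identify_cluster_type_py_alt resources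
instance (resources : List (List (String × String))) (out : String) : Decidable (Spec_identify_cluster_type_py resources out) := by unfold Spec_identify_cluster_type_py; infer_instance

-- ===== CLAIM (what is proved, stated in full; the proofs are below) =====
def Claim_equal_identify_cluster_type_py : Prop := ∀ (resources : List (List (String × String))), Dom_identify_cluster_type_py resources → Spec_identify_cluster_type_py resources (identify_cluster_type_py resources)

-- ===== LEMMAS AND PROOFS =====

-- running the fold from a seen state keeps the firsts and ANDs each flag with "all remaining values match"
theorem pvAlt_foldl_some (l : List (List (String × String)))
    (f1 f2 f3 : String) (u1 u2 u3 : Bool) :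
    l.foldl pvAltStep (some ((f1, f2, f3), (u1, u2, u3))) =
      some ((f1, f2, f3),
        (u1 && l.all (fun r => PySem.Dict.getD (PySem.Dict.mk r) "environment" "" == f1),
         u2 && l.all (fun r => PySem.Dict.getD (PySem.Dict.mk r) "application" "" == f2),
         u3 && l.all (fun r => PySem.Dict.getD (PySem.Dict.mk r) "service" "" == f3))) := by
  induction l generalizing u1 u2 u3 with
  | nil => simp only [List.foldl_nil, List.all_nil, Bool.and_true]
  | cons r t ih => simp [pvAltStep, ih, Bool.and_assoc]

-- set(x :: xs) has exactly one element iff every element of xs equals x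
theorem pvSet_len_one (x : String) (xs : List String) :
    ((PySem.Set.ofList (x :: xs)).length == 1) = xs.all (fun y => y == x) := by
  rcases h : xs.all (fun y => y == x) with _ | _
  · -- some y ≠ x: the set contains two distinct elements
    simp only [List.all_eq_false, beq_iff_eq] at h
    obtain ⟨y, hy, hyx⟩ := h
    have hxm : x ∈ PySem.Set.ofList (x :: xs) := by
      rw [PySem.Set.mem_ofList]; exact List.mem_cons_self ..
    have hym : y ∈ PySem.Set.ofList (x :: xs) := by
      rw [PySem.Set.mem_ofList]; exact List.mem_cons_of_mem _ hy
    simp only [beq_eq_false_iff_ne, ne_eq]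
    intro hlen
    obtain ⟨z, hz⟩ := List.length_eq_one_iff.mp hlen
    rw [hz] at hxm hym
    simp at hxm hym
    exact hyx (hym.trans hxm.symm)
  · -- all equal x: the set is [x]
    simp only [List.all_eq_true, beq_iff_eq] at h
    have hnd := PySem.Set.nodup_ofList (xs := x :: xs)
    have hmem : ∀ z, z ∈ PySem.Set.ofList (x :: xs) ↔ z ∈ x :: xs :=
      fun z => PySem.Set.mem_ofList ..
    have hall : ∀ z ∈ PySem.Set.ofList (x :: xs), z = x := by
      intro z hz
      rcases List.mem_cons.mp ((hmem z).mp hz) with h' | h'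
      · exact h'
      · exact h _ h'
    have hxm : x ∈ PySem.Set.ofList (x :: xs) := (hmem x).mpr (List.mem_cons_self ..)
    rcases hs : PySem.Set.ofList (x :: xs) with _ | ⟨a, _ | ⟨b, t⟩⟩
    · rw [hs] at hxm; simp at hxm
    · simp
    · exfalso
      rw [hs] at hall hnd
      have ha := hall a (by simp)
      have hb := hall b (by simp)
      rw [ha, hb] at hnd
      simp at hnd

theorem pv_main (resources : List (List (String × String))) :
    identify_cluster_type_py resources = identify_cluster_type_py_alt resources := by
  cases resources with
  | nil => decide
  | cons r t =>
    simp only [identify_cluster_type_py, identify_cluster_type_py_alt, List.map_cons,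
      List.foldl_cons, pvAltStep, pvAlt_foldl_some, pvSet_len_one, Bool.true_and,
      List.all_map]
    rfl

-- ===== VERDICT (by name: the statement is the Claim_ definition above) =====
theorem identify_cluster_type_py_spec : Claim_equal_identify_cluster_type_py := by
  intro resources _
  simpa [Spec_identify_cluster_type_py] using pv_main resources
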